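-- pv_equiv track=rewrite | github.com/GundalaNikhil/DSA | dsa-problems/Strings/solutions/python/STR-016-minimal-delete-k-periodic.py | minimal_delete_k_periodic
-- ===== SOURCE A (Python) =====
-- def minimal_delete_k_periodic(s: str, k: int) -> int:
--     n = len(s)
--     deletions = 0
--
--     for pos in range(k):
--         freq = {}
--
--         # Count frequency of characters at positions pos, pos+k, pos+2k, ...
--         i = pos
--         while i < n:
--             char = s[i]
--             freq[char] = freq.get(char, 0) + 1
--             i += k
--
--         # Keep most frequent, delete others
--         if freq:
--             max_freq = max(freq.values())
--             total_at_pos = sum(freq.values())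
--             deletions += total_at_pos - max_freq
--         else:
--              pass
--
--     return deletions
-- ===== SOURCE B (Python) =====
-- def minimal_delete_k_periodic(s: str, k: int) -> int:
--     if k <= 0:
--         return 0
--     # single forward pass: bucket counts keyed by residue i % k
--     table = {}
--     for i, ch in enumerate(s):
--         bucket = table.setdefault(i % k, {})
--         bucket[ch] = bucket.get(ch, 0) + 1
--     # keep the most frequent character of each bucket, delete the rest
--     keep = 0
--     for bucket in table.values():
--         keep += max(bucket.values())
--     return len(s) - keep
-- ===== Notes on version B (the rewrite author's own statement) =====
-- stated objective: alternative
-- what changed: A makes k passes, one strided inner while-loop per residue class; B makes one forward pass over the string building a dict of per-residue character counters keyed by i % k, then aggregates each bucket, so it never iterates over range(k).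
import Mathlib
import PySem

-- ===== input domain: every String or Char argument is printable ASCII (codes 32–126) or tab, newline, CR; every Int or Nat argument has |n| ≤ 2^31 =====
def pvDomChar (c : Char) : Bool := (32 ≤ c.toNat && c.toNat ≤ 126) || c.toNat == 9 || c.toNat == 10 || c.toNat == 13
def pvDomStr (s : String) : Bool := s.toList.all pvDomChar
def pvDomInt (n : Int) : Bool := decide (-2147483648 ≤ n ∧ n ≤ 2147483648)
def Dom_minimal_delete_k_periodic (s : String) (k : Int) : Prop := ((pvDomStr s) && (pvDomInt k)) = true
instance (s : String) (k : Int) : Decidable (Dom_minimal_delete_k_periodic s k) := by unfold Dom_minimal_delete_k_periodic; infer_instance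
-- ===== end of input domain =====

-- B replaces A's per-residue strided scans by one forward pass building a dict of per-residue
-- character counters, then aggregates the buckets (objective: alternative decomposition).


-- ===== PORT A =====
-- the inner 'while i < n: freq[s[i]] += 1; i += k' loop; the extra '0 < k' in the guard only
-- makes the function total (with k ≤ 0 and i < n the Python loop would not terminate; every
-- call site has 0 < k, where the guard is exactly Python's 'i < n')
def pvAWhile (chars : List Char) (n k i : Int) (freq : PySem.Dict Char Int) : PySem.Dict Char Int :=
  if h : i < n ∧ 0 < k then
    pvAWhile chars n k (i + k)
      (freq.insert (PySem.List.pyGetD chars i ' ')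
        (freq.getD (PySem.List.pyGetD chars i ' ') 0 + 1))
  else freq
termination_by (n - i).toNat
decreasing_by omega

def minimal_delete_k_periodic (s : String) (k : Int) : Int :=
  let n : Int := PySem.Str.len s
  (PySem.List.pyRange 0 k 1).foldl (fun deletions pos =>
    let freq := pvAWhile s.toList n k pos PySem.Dict.empty
    if freq.size ≠ 0 then
      let max_freq := (PySem.List.max? freq.values (fun v => v)).getD 0
      let total_at_pos := freq.values.sum
      deletions + (total_at_pos - max_freq)
    else deletions) 0

-- ===== PORT B =====
-- one step of B's single forward pass: bucket = table.setdefault(i % k, {}); bucket[ch] += 1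
def pvBStep (k : Int) (t : PySem.Dict Int (PySem.Dict Char Int)) (p : Int × Char) :
    PySem.Dict Int (PySem.Dict Char Int) :=
  let r := PySem.Int.mod p.1 k
  let bucket := t.getD r PySem.Dict.empty
  t.insert r (bucket.insert p.2 (bucket.getD p.2 0 + 1))

def minimal_delete_k_periodic_alt (s : String) (k : Int) : Int :=
  if k ≤ 0 then 0
  else
    let table := (PySem.List.enumerate s.toList 0).foldl (pvBStep k) PySem.Dict.empty
    let keep := table.values.foldl
      (fun acc bucket => acc + (PySem.List.max? (PySem.Dict.values bucket) (fun v => v)).getD 0) 0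
    PySem.Str.len s - keep

-- ===== PRECONDITION & SPEC =====
def Spec_minimal_delete_k_periodic (s : String) (k : Int) (out : Int) : Prop := out = minimal_delete_k_periodic_alt s k
instance (s : String) (k : Int) (out : Int) : Decidable (Spec_minimal_delete_k_periodic s k out) := by unfold Spec_minimal_delete_k_periodic; infer_instance

-- ===== CLAIM (what is proved, stated in full; the proofs are below) =====
def Claim_equal_minimal_delete_k_periodic : Prop := ∀ (s : String) (k : Int), Dom_minimal_delete_k_periodic s k → Spec_minimal_delete_k_periodic s k (minimal_delete_k_periodic s k)

-- ===== LEMMAS AND PROOFS =====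

-- the list of characters A's inner while loop visits: chars[i], chars[i+k], … while < n
def pvStride (chars : List Char) (n k i : Int) : List Char :=
  if _h : i < n ∧ 0 < k then PySem.List.pyGetD chars i ' ' :: pvStride chars n k (i + k) else []
termination_by (n - i).toNat
decreasing_by omega

lemma pvAWhile_eq_foldl (chars : List Char) (n k i : Int) (d : PySem.Dict Char Int) :
    pvAWhile chars n k i d =
      (pvStride chars n k i).foldl (fun d x => d.insert x (d.getD x 0 + 1)) d := by
  fun_induction pvAWhile chars n k i d with
  | case1 i d h ih => rw [pvStride, dif_pos h]; simp only [List.foldl]; exact ih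
  | case2 i d h => rw [pvStride, dif_neg h]; rfl

lemma pvAWhile_eq_counter (chars : List Char) (n k i : Int) :
    pvAWhile chars n k i PySem.Dict.empty = PySem.Dict.counter (pvStride chars n k i) := by
  rw [pvAWhile_eq_foldl, PySem.Dict.foldl_insert_getD_add_one_eq_counter]

lemma pvStride_nil (chars : List Char) {n k i : Int} (h : n ≤ i ∨ k ≤ 0) :
    pvStride chars n k i = [] := by
  rw [pvStride, dif_neg]
  omega

lemma pvStride_succ (chars : List Char) {k : Int} (n : Int) (hk : 0 < k) (i : Int) :
    pvStride chars (n + 1) k i =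
      pvStride chars n k i ++
        (if i ≤ n ∧ (n - i) % k = 0 then [PySem.List.pyGetD chars n ' '] else []) := by
  generalize hm : (n + 1 - i).toNat = m
  induction m using Nat.strong_induction_on generalizing i with
  | _ m ih =>
    rcases lt_trichotomy i n with hlt | heq | hgt
    · have hL : pvStride chars (n+1) k i = PySem.List.pyGetD chars i ' ' :: pvStride chars (n+1) k (i+k) := by
        conv_lhs => rw [pvStride]
        rw [dif_pos ⟨by omega, hk⟩]
      have hR : pvStride chars n k i = PySem.List.pyGetD chars i ' ' :: pvStride chars n k (i+k) := by
        conv_lhs => rw [pvStride]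
        rw [dif_pos ⟨hlt, hk⟩]
      have hrec := ih (n + 1 - (i + k)).toNat (by omega) (i + k) rfl
      rw [hL, hR, hrec]
      have hcond : (i + k ≤ n ∧ (n - (i + k)) % k = 0) ↔ (i ≤ n ∧ (n - i) % k = 0) := by
        have hsub : (n - (i + k)) % k = (n - i) % k := by
          have : n - (i + k) = (n - i) + (-1) * k := by ring
          rw [this, Int.add_mul_emod_self_right]
        constructor
        · rintro ⟨h1, h2⟩; exact ⟨by omega, by omega⟩
        · rintro ⟨h1, h2⟩
          refine ⟨?_, by omega⟩
          have hd : k ∣ (n - i) := Int.dvd_of_emod_eq_zero h2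
          rcases eq_or_lt_of_le h1 with he | hl
          · omega
          · have : k ≤ n - i := Int.le_of_dvd (by omega) hd
            omega
      simp only [List.cons_append]
      congr 1
      by_cases hc : i ≤ n ∧ (n - i) % k = 0
      · rw [if_pos hc, if_pos (hcond.mpr hc)]
      · rw [if_neg hc, if_neg (fun h => hc (hcond.mp h))]
    · subst heq
      rw [pvStride, dif_pos ⟨by omega, hk⟩]
      rw [pvStride_nil chars (by left; omega)]
      rw [pvStride_nil chars (by left; omega)]
      simp
    · rw [pvStride_nil chars (by left; omega), pvStride_nil chars (by left; omega)]
      rw [if_neg (by omega)]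
      rfl

-- the residue characterisation of pvStride_succ's side condition
lemma pvCond_iff {k n r : Int} (hk : 0 < k) (hn : 0 ≤ n) (h0 : 0 ≤ r) (hr : r < k) :
    (r ≤ n ∧ (n - r) % k = 0) ↔ r = n % k := by
  have hrk : r % k = r := Int.emod_eq_of_lt h0 hr
  have hmle : n % k ≤ n := by
    have hdef : n % k = n - k * (n / k) := Int.emod_def n k
    have hq : 0 ≤ n / k := Int.ediv_nonneg hn (le_of_lt hk)
    have := mul_nonneg (le_of_lt hk) hq
    omega
  constructor
  · rintro ⟨hle, hmod⟩
    have h1 : n % k = r % k := Int.emod_eq_emod_iff_emod_sub_eq_zero.mpr hmod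
    omega
  · intro h
    refine ⟨by omega, ?_⟩
    have : n % k = r % k := by omega
    exact Int.emod_eq_emod_iff_emod_sub_eq_zero.mp this

-- B's table after processing the first m characters
def pvTable (chars : List Char) (k : Int) (m : Nat) : PySem.Dict Int (PySem.Dict Char Int) :=
  (PySem.List.enumerate (chars.take m) 0).foldl (pvBStep k) PySem.Dict.empty

lemma pvTable_items (chars : List Char) {k : Int} (hk : 0 < k) :
    ∀ m : Nat, m ≤ chars.length →
      (pvTable chars k m).items =
        (PySem.List.pyRange 0 (min k m) 1).map
          (fun r => (r, PySem.Dict.counter (pvStride chars m k r))) := by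
  intro m
  induction m with
  | zero =>
    intro _
    rw [PySem.List.pyRange_one_eq_nil (by push_cast; omega)]
    rfl
  | succ m ih =>
    intro hm1
    have hm : m ≤ chars.length := by omega
    have hlen : m < chars.length := by omega
    have hIH := ih hm
    have hmnn : (0:Int) ≤ (m:Int) := Int.natCast_nonneg m
    have htake : chars.take (m+1) = chars.take m ++ [chars[m]] := by
      rw [List.take_add_one, List.getElem?_eq_getElem hlen]; rfl
    have hstep : pvTable chars k (m+1) = pvBStep k (pvTable chars k m) ((m:Int), chars[m]) := by
      unfold pvTable
      rw [htake, PySem.List.enumerate_append, List.foldl_append]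
      simp [List.length_take, Nat.min_eq_left hm, PySem.List.enumerate_cons,
        PySem.List.enumerate_nil]
    have hkeys : (pvTable chars k m).keys = PySem.List.pyRange 0 (min k (m:Int)) 1 := by
      show (pvTable chars k m).items.map (·.1) = _
      rw [hIH, List.map_map]
      exact List.map_id _
    have hknodup : (pvTable chars k m).keys.Nodup := by
      rw [hkeys]; exact PySem.List.nodup_pyRange_one _ _
    have hgetm : PySem.List.pyGetD chars ((m:Int)) ' ' = chars[m] := by
      simp [PySem.List.pyGetD_natCast, List.getD, List.getElem?_eq_getElem hlen]
    rw [hstep]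
    simp only [pvBStep, PySem.Int.mod_eq_emod_of_pos hk]
    push_cast
    by_cases hcase : (m:Int) < k
    · -- new residue class: m itself is a fresh key appended at the end
      have hρ : (m:Int) % k = (m:Int) := Int.emod_eq_of_lt hmnn hcase
      have hcont : (pvTable chars k m).contains ((m:Int) % k) = false := by
        rw [hρ, PySem.Dict.contains_eq_decide_mem_keys, hkeys]
        simp [PySem.List.mem_pyRange_one]
      rw [PySem.Dict.items_insert_of_not_contains _ _ hcont,
        PySem.Dict.getD_of_not_contains _ _ hcont]
      have hmin : min k (m:Int) = (m:Int) := by omega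
      have hmin1 : min k ((m:Int)+1) = (m:Int)+1 := by omega
      rw [hmin1, PySem.List.pyRange_one_succ_right hmnn, List.map_append, hIH, hmin]
      congr 1
      · apply List.map_congr_left
        intro r hr
        rw [PySem.List.mem_pyRange_one] at hr
        rw [pvStride_succ chars (m:Int) hk r, if_neg, List.append_nil]
        intro hc
        have := (pvCond_iff hk hmnn hr.1 (by omega)).mp hc
        omega
      · simp only [List.map_cons, List.map_nil]
        rw [hρ, pvStride_succ chars (m:Int) hk (m:Int),
          pvStride_nil chars (by left; exact le_refl _), if_pos ⟨le_refl _, by simp⟩,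
          List.nil_append, hgetm]
        have hc1 := PySem.Dict.foldl_insert_getD_add_one_eq_counter (κ := Char) [chars[m]]
        simp only [List.foldl] at hc1
        rw [hc1]
    · -- existing residue class: the bucket at m % k is updated in place
      have hkm : k ≤ (m:Int) := by omega
      have hρ0 : 0 ≤ (m:Int) % k := Int.emod_nonneg _ (by omega)
      have hρk : (m:Int) % k < k := Int.emod_lt_of_pos _ hk
      have hmin : min k (m:Int) = k := by omega
      have hmin1 : min k ((m:Int)+1) = k := by omega
      have hmem : ((m:Int) % k) ∈ PySem.List.pyRange 0 (min k (m:Int)) 1 := by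
        rw [PySem.List.mem_pyRange_one]; omega
      have hcont : (pvTable chars k m).contains ((m:Int) % k) = true := by
        rw [PySem.Dict.contains_eq_decide_mem_keys, hkeys]
        simpa using hmem
      have hitem : (((m:Int) % k),
          PySem.Dict.counter (pvStride chars (m:Int) k ((m:Int) % k))) ∈ (pvTable chars k m).items := by
        rw [hIH]
        exact List.mem_map_of_mem hmem
      have hbucket : (pvTable chars k m).getD ((m:Int) % k) PySem.Dict.empty =
          PySem.Dict.counter (pvStride chars (m:Int) k ((m:Int) % k)) :=
        PySem.Dict.getD_of_mem_items _ hitem hknodup _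
      have hc1 := PySem.Dict.foldl_insert_getD_add_one_eq_counter
        ((pvStride chars (m:Int) k ((m:Int) % k)) ++ [chars[m]])
      rw [List.foldl_append, PySem.Dict.foldl_insert_getD_add_one_eq_counter] at hc1
      simp only [List.foldl] at hc1
      rw [PySem.Dict.items_insert_of_contains _ _ hcont, hbucket, hc1, hIH, List.map_map,
        hmin1, hmin]
      apply List.map_congr_left
      intro r hr
      rw [PySem.List.mem_pyRange_one] at hr
      simp only [Function.comp]
      by_cases hrρ : r = (m:Int) % k
      · subst hrρ
        simp only [BEq.rfl, if_pos]
        rw [pvStride_succ chars (m:Int) hk, if_pos, hgetm]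
        exact (pvCond_iff hk hmnn hρ0 hρk).mpr rfl
      · rw [if_neg (by simp [hrρ]), pvStride_succ chars (m:Int) hk r, if_neg, List.append_nil]
        intro hc
        exact hrρ ((pvCond_iff hk hmnn hr.1 hr.2).mp hc)

lemma pvSum_map_sub {α : Type} (l : List α) (f g : α → Int) :
    (l.map (fun x => f x - g x)).sum = (l.map f).sum - (l.map g).sum := by
  induction l with
  | nil => simp
  | cons a t ih => simp only [List.map_cons, List.sum_cons, ih]; ring

lemma pvSum_stride_len (chars : List Char) {k : Int} (hk : 0 < k) :
    ∀ m : Nat,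
      ((PySem.List.pyRange 0 (min k m) 1).map
        (fun r => ((pvStride chars m k r).length : Int))).sum = m := by
  intro m
  induction m with
  | zero => rw [PySem.List.pyRange_one_eq_nil (by push_cast; omega)]; simp
  | succ m ih =>
    have hmnn : (0:Int) ≤ (m:Int) := Int.natCast_nonneg m
    push_cast
    by_cases hcase : (m:Int) < k
    · have hmin : min k (m:Int) = (m:Int) := by omega
      have hmin1 : min k ((m:Int)+1) = (m:Int)+1 := by omega
      rw [hmin1, PySem.List.pyRange_one_succ_right hmnn, List.map_append, List.sum_append]
      have h1 : (PySem.List.pyRange 0 (m:Int) 1).map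
            (fun r => ((pvStride chars ((m:Int)+1) k r).length : Int)) =
          (PySem.List.pyRange 0 (m:Int) 1).map
            (fun r => ((pvStride chars (m:Int) k r).length : Int)) := by
        apply List.map_congr_left
        intro r hr
        rw [PySem.List.mem_pyRange_one] at hr
        rw [pvStride_succ chars (m:Int) hk r, if_neg, List.append_nil]
        intro hc
        have := (pvCond_iff hk hmnn hr.1 (by omega)).mp hc
        have hmm : (m:Int) % k = (m:Int) := Int.emod_eq_of_lt hmnn hcase
        omega
      rw [hmin] at ih
      rw [h1, ih]
      rw [List.map_cons, List.map_nil, pvStride_succ chars (m:Int) hk (m:Int),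
        pvStride_nil chars (by left; exact le_refl _), if_pos ⟨le_refl _, by simp⟩]
      simp
    · have hmin : min k ((m:Int)) = k := by omega
      have hmin1 : min k ((m:Int)+1) = k := by omega
      have hρ0 : 0 ≤ (m:Int) % k := Int.emod_nonneg _ (by omega)
      have hρk : (m:Int) % k < k := Int.emod_lt_of_pos _ hk
      rw [hmin1]
      have h1 : (PySem.List.pyRange 0 k 1).map
            (fun r => ((pvStride chars ((m:Int)+1) k r).length : Int)) =
          (PySem.List.pyRange 0 k 1).map
            (fun r => ((pvStride chars (m:Int) k r).length : Int) +
              (if (r == (m:Int) % k) = true then (1:Int) else 0)) := by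
        apply List.map_congr_left
        intro r hr
        rw [PySem.List.mem_pyRange_one] at hr
        rw [pvStride_succ chars (m:Int) hk r, List.length_append]
        by_cases hr2 : r = (m:Int) % k
        · rw [if_pos ((pvCond_iff hk hmnn hr.1 hr.2).mpr hr2), if_pos (by simpa using hr2)]
          simp
        · rw [if_neg (fun hc => hr2 ((pvCond_iff hk hmnn hr.1 hr.2).mp hc)),
            if_neg (by simpa using hr2)]
          simp
      rw [h1, PySem.List.sum_map_add_int]
      rw [hmin] at ih
      rw [ih, PySem.List.sum_map_ite_one_zero]
      have hcount : (PySem.List.pyRange 0 k 1).countP (· == (m:Int) % k) = 1 := by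
        rw [show ((· == (m:Int) % k) : Int → Bool) = (fun r => r == (m:Int) % k) from rfl]
        rw [← List.count]
        exact List.count_eq_one_of_mem (PySem.List.nodup_pyRange_one _ _)
          (by rw [PySem.List.mem_pyRange_one]; omega)
      rw [hcount]
      push_cast; ring

lemma pvCounter_size_ne_zero {cs : List Char} (h : cs ≠ []) :
    (PySem.Dict.counter cs).size ≠ 0 := by
  show ((PySem.Dict.counter cs).items).length ≠ 0
  rw [PySem.Dict.items_counter, List.length_map]
  cases cs with
  | nil => simp at h
  | cons a t => rw [PySem.Set.ofList_cons]; simp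

lemma pvSum_values_counter (cs : List Char) :
    (PySem.Dict.counter cs).values.sum = (cs.length : Int) := by
  have hv : (PySem.Dict.counter cs).values =
      (PySem.Set.ofList cs).map (fun v => ((cs.count v : Nat) : Int)) := by
    show ((PySem.Dict.counter cs).items).map (·.2) = _
    rw [PySem.Dict.items_counter, List.map_map]
    rfl
  have hperm : (PySem.Set.ofList cs).Perm cs.dedup := by
    rw [List.perm_ext_iff_of_nodup (PySem.Set.nodup_ofList cs) (List.nodup_dedup cs)]
    intro a; rw [PySem.Set.mem_ofList, List.mem_dedup]
  rw [hv, List.Perm.sum_eq (hperm.map _)]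
  rw [show (fun v => ((cs.count v : Nat) : Int)) = (Nat.cast ∘ fun v => cs.count v) from rfl,
    ← List.map_map, ← Nat.cast_list_sum, List.sum_map_count_dedup_eq_length]

lemma pvA_foldl (l : List Int) (chars : List Char) (n k : Int) :
    ∀ init : Int,
      l.foldl (fun deletions pos =>
        if (PySem.Dict.counter (pvStride chars n k pos)).size ≠ 0 then
          deletions + ((PySem.Dict.counter (pvStride chars n k pos)).values.sum -
            (PySem.List.max? (PySem.Dict.counter (pvStride chars n k pos)).values (fun v => v)).getD 0)
        else deletions) init
      = init + (l.map (fun pos =>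
          if (PySem.Dict.counter (pvStride chars n k pos)).size ≠ 0 then
            ((PySem.Dict.counter (pvStride chars n k pos)).values.sum -
              (PySem.List.max? (PySem.Dict.counter (pvStride chars n k pos)).values (fun v => v)).getD 0)
          else 0)).sum := by
  induction l with
  | nil => intro init; simp
  | cons a t ih =>
    intro init
    simp only [List.foldl_cons, List.map_cons, List.sum_cons]
    by_cases h : (PySem.Dict.counter (pvStride chars n k a)).size ≠ 0
    · rw [if_pos h, if_pos h, ih]; ring
    · rw [if_neg h, if_neg h, ih]; ring

-- ===== VERDICT (by name: the statement is the Claim_ definition above) =====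
theorem minimal_delete_k_periodic_spec : Claim_equal_minimal_delete_k_periodic := by
  intro s k _
  show minimal_delete_k_periodic s k = minimal_delete_k_periodic_alt s k
  by_cases hk0 : k ≤ 0
  · simp only [minimal_delete_k_periodic, minimal_delete_k_periodic_alt, if_pos hk0]
    rw [PySem.List.pyRange_one_eq_nil (by omega)]
    rfl
  · have hk : 0 < k := by omega
    have hlen : PySem.Str.len s = (s.toList.length : Int) := PySem.Str.len_eq s
    have hA : minimal_delete_k_periodic s k
        = ((PySem.List.pyRange 0 k 1).map (fun pos =>
            if (PySem.Dict.counter (pvStride s.toList (s.toList.length : Int) k pos)).size ≠ 0 then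
              ((PySem.Dict.counter (pvStride s.toList (s.toList.length : Int) k pos)).values.sum -
                (PySem.List.max? (PySem.Dict.counter (pvStride s.toList (s.toList.length : Int) k pos)).values
                  (fun v => v)).getD 0)
            else 0)).sum := by
      simp only [minimal_delete_k_periodic, hlen, pvAWhile_eq_counter]
      rw [pvA_foldl (PySem.List.pyRange 0 k 1) s.toList (s.toList.length : Int) k 0]
      ring
    have hB : minimal_delete_k_periodic_alt s k = (s.toList.length : Int) -
        ((PySem.List.pyRange 0 (min k (s.toList.length : Int)) 1).map
          (fun r => (PySem.List.max?
            (PySem.Dict.counter (pvStride s.toList (s.toList.length : Int) k r)).values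
            (fun v => v)).getD 0)).sum := by
      simp only [minimal_delete_k_periodic_alt, if_neg (not_le.mpr hk), hlen]
      have ht : (PySem.List.enumerate s.toList 0).foldl (pvBStep k) PySem.Dict.empty
          = pvTable s.toList k s.toList.length := by
        unfold pvTable; rw [List.take_length]
      have hv : (pvTable s.toList k s.toList.length).values =
          (PySem.List.pyRange 0 (min k (s.toList.length : Int)) 1).map
            (fun r => PySem.Dict.counter (pvStride s.toList (s.toList.length : Int) k r)) := by
        show ((pvTable s.toList k s.toList.length).items).map (·.2) = _
        rw [pvTable_items s.toList hk s.toList.length (le_refl _), List.map_map]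
        rfl
      rw [ht, hv, PySem.List.foldl_add _ (fun bucket =>
        (PySem.List.max? (PySem.Dict.values bucket) (fun v => v)).getD 0) 0]
      rw [List.map_map, zero_add]
      rfl
    rw [hA, hB,
      PySem.List.pyRange_one_append 0 (min k (s.toList.length : Int)) k (by omega) (by omega),
      List.map_append, List.sum_append]
    have h2 : ((PySem.List.pyRange (min k (s.toList.length : Int)) k 1).map (fun pos =>
        if (PySem.Dict.counter (pvStride s.toList (s.toList.length : Int) k pos)).size ≠ 0 then
          ((PySem.Dict.counter (pvStride s.toList (s.toList.length : Int) k pos)).values.sum -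
            (PySem.List.max? (PySem.Dict.counter (pvStride s.toList (s.toList.length : Int) k pos)).values
              (fun v => v)).getD 0)
        else 0)).sum = 0 := by
      apply List.sum_eq_zero
      intro x hx
      rcases List.mem_map.mp hx with ⟨pos, hpos, rfl⟩
      rw [PySem.List.mem_pyRange_one] at hpos
      rw [pvStride_nil s.toList (by left; omega)]
      decide
    have h3 : ((PySem.List.pyRange 0 (min k (s.toList.length : Int)) 1).map (fun pos =>
        if (PySem.Dict.counter (pvStride s.toList (s.toList.length : Int) k pos)).size ≠ 0 then
          ((PySem.Dict.counter (pvStride s.toList (s.toList.length : Int) k pos)).values.sum -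
            (PySem.List.max? (PySem.Dict.counter (pvStride s.toList (s.toList.length : Int) k pos)).values
              (fun v => v)).getD 0)
        else 0))
        = ((PySem.List.pyRange 0 (min k (s.toList.length : Int)) 1).map (fun pos =>
            ((PySem.Dict.counter (pvStride s.toList (s.toList.length : Int) k pos)).values.sum -
              (PySem.List.max? (PySem.Dict.counter (pvStride s.toList (s.toList.length : Int) k pos)).values
                (fun v => v)).getD 0))) := by
      apply List.map_congr_left
      intro r hr
      rw [PySem.List.mem_pyRange_one] at hr
      have hne : pvStride s.toList (s.toList.length : Int) k r ≠ [] := by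
        rw [pvStride, dif_pos ⟨by omega, hk⟩]
        exact List.cons_ne_nil _ _
      rw [if_pos (pvCounter_size_ne_zero hne)]
    rw [h2, h3, pvSum_map_sub]
    have h4 : ((PySem.List.pyRange 0 (min k (s.toList.length : Int)) 1).map (fun pos =>
        (PySem.Dict.counter (pvStride s.toList (s.toList.length : Int) k pos)).values.sum))
        = ((PySem.List.pyRange 0 (min k (s.toList.length : Int)) 1).map (fun pos =>
            ((pvStride s.toList (s.toList.length : Int) k pos).length : Int))) := by
      apply List.map_congr_left
      intro r _
      exact pvSum_values_counter _
    rw [h4, pvSum_stride_len s.toList hk s.toList.length]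
    ring
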